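-- pv_equiv track=rewrite | github.com/SilverStarn/PHI-Guard-Intelligence | apps/scanner/phi_guard_scanner/importers.py | _split_sql_columns
-- ===== SOURCE A (Python) =====
-- def _split_sql_columns(body: str) -> list[str]:
--     parts = []
--     current = []
--     depth = 0
--     for char in body:
--         if char == "(":
--             depth += 1
--         elif char == ")":
--             depth = max(0, depth - 1)
--         if char == "," and depth == 0:
--             parts.append("".join(current))
--             current = []
--         else:
--             current.append(char)
--     if current:
--         parts.append("".join(current))
--     return parts
-- ===== SOURCE B (Python) =====
-- def _split_sql_columns(body: str) -> list[str]:
--     # Pass 1: record the indices of top-level commas.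
--     depth = 0
--     cuts = []
--     for i, ch in enumerate(body):
--         if ch == "(":
--             depth += 1
--         elif ch == ")":
--             depth = max(0, depth - 1)
--         elif ch == "," and depth == 0:
--             cuts.append(i)
--     # Pass 2: rebuild the parts by slicing between the recorded cuts.
--     parts = []
--     start = 0
--     for c in cuts:
--         parts.append(body[start:c])
--         start = c + 1
--     tail = body[start:]
--     if tail:
--         parts.append(tail)
--     return parts
-- ===== Notes on version B (the rewrite author's own statement) =====
-- stated objective: alternative
-- what changed: Replaces the per-character accumulator that builds each piece with a two-pass scheme: a first pass records the indices of top-level commas, a second pass reconstructs the parts by slicing the original string between consecutive cuts (trailing slice appended only if nonempty).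
import Mathlib
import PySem

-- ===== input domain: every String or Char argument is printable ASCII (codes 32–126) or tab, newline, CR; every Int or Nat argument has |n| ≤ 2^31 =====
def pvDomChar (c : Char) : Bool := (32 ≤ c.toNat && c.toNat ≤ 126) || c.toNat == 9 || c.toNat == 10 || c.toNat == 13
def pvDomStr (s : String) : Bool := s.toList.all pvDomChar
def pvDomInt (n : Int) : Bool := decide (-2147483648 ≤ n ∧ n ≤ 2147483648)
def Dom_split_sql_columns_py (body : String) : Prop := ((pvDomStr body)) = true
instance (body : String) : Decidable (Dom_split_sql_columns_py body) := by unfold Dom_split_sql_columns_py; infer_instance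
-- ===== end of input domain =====

-- B replaces A's per-character piece accumulator with a two-pass scheme (record top-level comma
-- indices, then slice the string between cuts); same O(n) cost, different organisation.

-- ===== PORT A =====
-- the for-loop over body, state (parts, current, depth); comma test runs after the depth update
def pvLoopA : List Char → List String → List Char → Int → List String
  | [], parts, cur, _ => if cur.isEmpty then parts else parts ++ [String.mk cur]
  | c :: rest, parts, cur, d =>
    let d' := if c = '(' then d + 1 else if c = ')' then max 0 (d - 1) else d
    if c = ',' ∧ d' = 0 then pvLoopA rest (parts ++ [String.mk cur]) [] d'
    else pvLoopA rest parts (cur ++ [c]) d'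

def split_sql_columns_py (body : String) : List String :=
  pvLoopA body.toList [] [] 0

-- ===== PORT B =====
-- pass 1: for i, ch in enumerate(body): record top-level comma indices
def pvCutsLoop : List (Int × Char) → Int → List Int → List Int
  | [], _, cuts => cuts
  | (i, ch) :: rest, d, cuts =>
    if ch = '(' then pvCutsLoop rest (d + 1) cuts
    else if ch = ')' then pvCutsLoop rest (max 0 (d - 1)) cuts
    else if ch = ',' ∧ d = 0 then pvCutsLoop rest d (cuts ++ [i])
    else pvCutsLoop rest d cuts

-- pass 2: for c in cuts: append body[start:c], start = c+1; then append body[start:] if nonempty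
def pvSliceLoop (cs : List Char) : List Int → Int → List String → List String
  | [], start, parts =>
    let tail := PySem.List.slice cs (some start) none
    if tail.isEmpty then parts else parts ++ [String.mk tail]
  | c :: rest, start, parts =>
    pvSliceLoop cs rest (c + 1) (parts ++ [String.mk (PySem.List.slice cs (some start) (some c))])

def split_sql_columns_py_alt (body : String) : List String :=
  pvSliceLoop body.toList (pvCutsLoop (PySem.List.enumerate body.toList 0) 0 []) 0 []

-- ===== PRECONDITION & SPEC =====
def Spec_split_sql_columns_py (body : String) (out : List String) : Prop := out = split_sql_columns_py_alt body
instance (body : String) (out : List String) : Decidable (Spec_split_sql_columns_py body out) := by unfold Spec_split_sql_columns_py; infer_instance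

-- ===== CLAIM (what is proved, stated in full; the proofs are below) =====
def Claim_equal_split_sql_columns_py : Prop := ∀ (body : String), Dom_split_sql_columns_py body → Spec_split_sql_columns_py body (split_sql_columns_py body)

-- ===== LEMMAS AND PROOFS =====

-- common reference splitter: chars since the last cut in `cur`, current depth `d`
def pvSpecSplit : List Char → List Char → Int → List String
  | [], cur, _ => if cur = [] then [] else [String.mk cur]
  | c :: rest, cur, d =>
    let d' := if c = '(' then d + 1 else if c = ')' then max 0 (d - 1) else d
    if c = ',' ∧ d' = 0 then String.mk cur :: pvSpecSplit rest [] d'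
    else pvSpecSplit rest (cur ++ [c]) d'

-- relative positions of the top-level commas of `cs` at depth `d`
def pvCutsRel : List Char → Int → List Int
  | [], _ => []
  | c :: rest, d =>
    if c = '(' then (pvCutsRel rest (d + 1)).map (· + 1)
    else if c = ')' then (pvCutsRel rest (max 0 (d - 1))).map (· + 1)
    else if c = ',' ∧ d = 0 then 0 :: (pvCutsRel rest d).map (· + 1)
    else (pvCutsRel rest d).map (· + 1)

lemma pvLoopA_eq (cs : List Char) : ∀ (parts : List String) (cur : List Char) (d : Int),
    pvLoopA cs parts cur d = parts ++ pvSpecSplit cs cur d := by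
  induction cs with
  | nil =>
    intro parts cur d
    cases cur <;> simp [pvLoopA, pvSpecSplit]
  | cons c rest ih =>
    intro parts cur d
    simp only [pvLoopA, pvSpecSplit]
    split_ifs <;> rw [ih] <;> simp

lemma pvCutsLoop_eq (cs : List Char) : ∀ (n d : Int) (acc : List Int),
    pvCutsLoop (PySem.List.enumerate cs n) d acc = acc ++ (pvCutsRel cs d).map (· + n) := by
  induction cs with
  | nil => intro n d acc; simp [PySem.List.enumerate_nil, pvCutsLoop, pvCutsRel]
  | cons c rest ih =>
    intro n d acc
    rw [PySem.List.enumerate_cons]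
    simp only [pvCutsLoop, pvCutsRel]
    split_ifs with h1 h2 h3
    · rw [ih]; simp only [List.map_map]; congr 1; apply List.map_congr_left; intro k _; simp; ring
    · rw [ih]; simp only [List.map_map]; congr 1; apply List.map_congr_left; intro k _; simp; ring
    · rw [ih]
      simp only [List.map_cons, List.map_map, List.append_assoc, List.singleton_append]
      congr 2
      · omega
      · apply List.map_congr_left; intro k _; simp; ring
    · rw [ih]; simp only [List.map_map]; congr 1; apply List.map_congr_left; intro k _; simp; ring

lemma pvSliceLoop_eq (full : List Char) : ∀ (rest cur : List Char) (d : Int) (s : Nat)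
    (parts : List String), full.drop s = cur ++ rest →
    pvSliceLoop full ((pvCutsRel rest d).map (fun k => k + (s : Int) + (cur.length : Int)))
        ((s : Nat) : Int) parts
      = parts ++ pvSpecSplit rest cur d := by
  intro rest
  induction rest with
  | nil =>
    intro cur d s parts hdrop
    simp only [pvCutsRel, List.map_nil, pvSliceLoop, PySem.List.slice_from_natCast, hdrop,
      List.append_nil, pvSpecSplit]
    cases cur <;> simp
  | cons c rs ih =>
    intro cur d s parts hdrop
    simp only [pvCutsRel, pvSpecSplit]
    by_cases h3 : c = ',' ∧ d = 0
    · -- a top-level comma: '(' and ')' branches are dead, depth unchanged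
      obtain ⟨hc, hd⟩ := h3
      subst hc hd
      rw [if_neg (by decide), if_neg (by decide), if_pos ⟨rfl, rfl⟩, if_pos ⟨rfl, rfl⟩]
      simp only [List.map_cons, List.map_map, pvSliceLoop]
      have hsl : PySem.List.slice full (some ((s : Nat) : Int)) (some ((0 : Int) + (s : Int) + (cur.length : Int)))
          = cur := by
        have : ((0 : Int) + (s : Int) + (cur.length : Int)) = ((s : Int) + ((cur.length : Nat) : Int)) := by
          ring
        rw [this, PySem.List.slice_natCast_add, hdrop, List.take_left]
      rw [hsl]
      have hst : ((0 : Int) + (s : Int) + (cur.length : Int) + 1) = (((s + cur.length + 1 : Nat) : Nat) : Int) := by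
        push_cast; ring
      rw [hst]
      have hcuts : (pvCutsRel rs 0).map ((fun k => k + (s : Int) + (cur.length : Int)) ∘ fun x => x + 1)
          = (pvCutsRel rs 0).map (fun k => k + ((s + cur.length + 1 : Nat) : Int) + ((([] : List Char).length : Nat) : Int)) := by
        apply List.map_congr_left; intro k _; simp; ring
      rw [hcuts, ih [] 0 (s + cur.length + 1) (parts ++ [String.mk cur]) ?_]
      · simp
      · have : full.drop (s + cur.length + 1) = (full.drop s).drop (cur.length + 1) := by
          rw [List.drop_drop]; ring_nf
        rw [this, hdrop]
        have : cur ++ ',' :: rs = (cur ++ [',']) ++ rs := by simp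
        rw [this]
        have hlen : (cur ++ [',']).length = cur.length + 1 := by simp
        rw [← hlen, List.drop_left]
        simp
    · -- not a top-level comma: piece keeps growing, recurse with cur ++ [c]
      have hd' : ¬ (c = ',' ∧ (if c = '(' then d + 1 else if c = ')' then max 0 (d - 1) else d) = 0) := by
        rintro ⟨hc, hd⟩
        subst hc
        rw [if_neg (by decide : ¬ (',' : Char) = '('), if_neg (by decide : ¬ (',' : Char) = ')')] at hd
        exact h3 ⟨rfl, hd⟩
      rw [if_neg hd']
      have key : ∀ d'' : Int,
          pvSliceLoop full (((pvCutsRel rs d'').map (fun x => x + 1)).map (fun k => k + (s : Int) + (cur.length : Int)))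
              ((s : Nat) : Int) parts
            = parts ++ pvSpecSplit rs (cur ++ [c]) d'' := by
        intro d''
        have hcuts : ((pvCutsRel rs d'').map (fun x => x + 1)).map (fun k => k + (s : Int) + (cur.length : Int))
            = (pvCutsRel rs d'').map (fun k => k + (s : Int) + (((cur ++ [c]).length : Nat) : Int)) := by
          rw [List.map_map]; apply List.map_congr_left; intro k _; simp; ring
        rw [hcuts, ih (cur ++ [c]) d'' s parts (by rw [hdrop]; simp)]
      split_ifs with h1 h2 <;> exact key _

-- ===== VERDICT (by name: the statement is the Claim_ definition above) =====
theorem split_sql_columns_py_spec : Claim_equal_split_sql_columns_py := by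
  unfold Claim_equal_split_sql_columns_py
  intro body _
  unfold Spec_split_sql_columns_py split_sql_columns_py split_sql_columns_py_alt
  rw [pvLoopA_eq, pvCutsLoop_eq]
  have hcuts : (pvCutsRel body.toList 0).map (· + (0 : Int))
      = (pvCutsRel body.toList 0).map (fun k => k + ((0 : Nat) : Int) + ((([] : List Char).length : Nat) : Int)) := by
    apply List.map_congr_left; intro k _; simp
  simp only [List.nil_append]
  rw [hcuts]
  have := pvSliceLoop_eq body.toList body.toList [] 0 0 [] (by simp)
  simp only [Nat.cast_zero, List.nil_append] at this ⊢
  rw [this]
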